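-- pv_equiv track=rewrite | github.com/psuzzi/algo.dev | compete/codejam/2020/codejam20/src/codejam20/comp/r1a1/p55-jerrymao-00000000002b4483.txt.py | union_p
-- ===== SOURCE A (Python) =====
-- def union_p(prefixes):
--     longest = ''
--     for prefix in prefixes:
--         if len(prefix) > len(longest):
--             longest = prefix
--     for prefix in prefixes:
--         if longest.find(prefix) != 0:
--             return None
--     return longest
-- ===== SOURCE B (Python) =====
-- def union_p(prefixes):
--     ordered = sorted(prefixes, key=len)
--     if not ordered:
--         return ''
--     for shorter, longer in zip(ordered, ordered[1:]):
--         if not longer.startswith(shorter):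
--             return None
--     return ordered[-1]
-- ===== Notes on version B (the rewrite author's own statement) =====
-- stated objective: alternative
-- what changed: A picks the max-length string with a linear scan and then scans all strings testing longest.find(p)==0; B instead sorts by length and verifies the adjacent startswith chain on the sorted list, returning its last element.
import Mathlib
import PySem

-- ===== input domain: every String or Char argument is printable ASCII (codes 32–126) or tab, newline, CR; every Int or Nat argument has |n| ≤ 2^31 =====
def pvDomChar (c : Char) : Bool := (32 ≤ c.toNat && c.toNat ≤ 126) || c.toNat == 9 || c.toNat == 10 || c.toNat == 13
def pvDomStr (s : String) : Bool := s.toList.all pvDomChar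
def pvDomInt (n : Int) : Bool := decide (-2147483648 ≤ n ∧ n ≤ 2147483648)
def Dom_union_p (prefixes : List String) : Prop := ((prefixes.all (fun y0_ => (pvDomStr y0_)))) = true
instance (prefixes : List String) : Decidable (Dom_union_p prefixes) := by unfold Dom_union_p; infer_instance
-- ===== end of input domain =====

-- B re-frames the task: instead of taking the max-length string and scanning all strings
-- against it (A), B sorts by length and verifies the adjacent prefix chain, returning the
-- last element ('alternative' decomposition; same asymptotic work up to the sort).

-- ===== PORT A =====
-- second loop of A: early return None on a non-prefix, else return longest
def unionCheck (longest : String) : List String → Option String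
  | [] => some longest
  | p :: rest => if PySem.Str.find longest p ≠ 0 then none else unionCheck longest rest

def union_p (prefixes : List String) : Option String :=
  let longest := prefixes.foldl
    (fun longest p => if PySem.Str.len p > PySem.Str.len longest then p else longest) ""
  unionCheck longest prefixes

-- ===== PORT B =====
-- B's loop over zip(ordered, ordered[1:]): early return None when a pair breaks the chain
def chainOk : List (String × String) → Bool
  | [] => true
  | (shorter, longer) :: rest =>
      if !(PySem.Str.startswith longer shorter) then false else chainOk rest

def union_p_alt (prefixes : List String) : Option String :=
  let ordered := PySem.List.sorted prefixes (fun s => PySem.Str.len s)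
  match ordered with
  | [] => some ""
  | x :: t =>
      if chainOk ((x :: t).zip t) then some ((x :: t).getLast (by simp)) else none

-- ===== PRECONDITION & SPEC =====
def Spec_union_p (prefixes : List String) (out : Option String) : Prop := out = union_p_alt prefixes
instance (prefixes : List String) (out : Option String) : Decidable (Spec_union_p prefixes out) := by unfold Spec_union_p; infer_instance

-- ===== CLAIM (what is proved, stated in full; the proofs are below) =====
def Claim_equal_union_p : Prop := ∀ (prefixes : List String), Dom_union_p prefixes → Spec_union_p prefixes (union_p prefixes)

-- ===== LEMMAS AND PROOFS =====

-- Python's longest.find(p) == 0 is exactly "p is a prefix of longest"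
theorem find_eq_zero_iff (s p : String) :
    PySem.Str.find s p = 0 ↔ p.toList <+: s.toList := by
  rw [PySem.Str.find_eq]
  constructor
  · intro h
    have h0 : (0:Int) ≤ PySem.Chars.find s.toList p.toList := by omega
    have := (PySem.Chars.find_spec h0).1
    simpa [h] using this
  · intro h
    have h0 : (0:Int) ≤ PySem.Chars.find s.toList p.toList :=
      (PySem.Chars.find_nonneg_iff _ _).mpr h.isInfix
    rcases PySem.Chars.find_spec h0 with ⟨_, hmin⟩
    by_contra hne
    have : (0:Nat) < (PySem.Chars.find s.toList p.toList).toNat := by omega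
    exact hmin 0 this (by simpa using h)

-- A's second loop characterised
theorem unionCheck_eq (L : String) (xs : List String) :
    unionCheck L xs =
      if ∀ p ∈ xs, p.toList <+: L.toList then some L else none := by
  induction xs with
  | nil => simp [unionCheck]
  | cons p rest ih =>
      by_cases hp : p.toList <+: L.toList
      · have hf : PySem.Str.find L p = 0 := (find_eq_zero_iff L p).mpr hp
        rw [PySem.Str.find_eq] at hf
        simp [unionCheck, hf, ih, hp]
      · have hf : PySem.Str.find L p ≠ 0 := fun h => hp ((find_eq_zero_iff L p).mp h)
        rw [PySem.Str.find_eq] at hf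
        simp [unionCheck, hf, hp]

-- A's first loop: the accumulator is an input string (or the start value) of maximal length
theorem foldl_longest_spec (xs : List String) (l0 : String) :
    (xs.foldl (fun longest p => if PySem.Str.len p > PySem.Str.len longest then p else longest) l0 = l0
      ∨ xs.foldl (fun longest p => if PySem.Str.len p > PySem.Str.len longest then p else longest) l0 ∈ xs)
    ∧ PySem.Str.len l0 ≤ PySem.Str.len (xs.foldl (fun longest p => if PySem.Str.len p > PySem.Str.len longest then p else longest) l0)
    ∧ ∀ p ∈ xs, PySem.Str.len p ≤ PySem.Str.len (xs.foldl (fun longest p => if PySem.Str.len p > PySem.Str.len longest then p else longest) l0) := by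
  induction xs generalizing l0 with
  | nil => simp
  | cons x rest ih =>
      simp only [List.foldl_cons]
      by_cases hx : PySem.Str.len x > PySem.Str.len l0
      · rw [if_pos hx]
        rcases ih x with ⟨hm, hle, hall⟩
        refine ⟨?_, by omega, ?_⟩
        · rcases hm with h | h
          · right; rw [h]; exact List.mem_cons_self
          · right; exact List.mem_cons_of_mem x h
        · intro p hp
          rcases List.mem_cons.mp hp with rfl | hp
          · exact hle
          · exact hall p hp
      · rw [if_neg hx]
        rcases ih l0 with ⟨hm, hle, hall⟩
        refine ⟨?_, hle, ?_⟩
        · rcases hm with h | h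
          · left; exact h
          · right; exact List.mem_cons_of_mem x h
        · intro p hp
          rcases List.mem_cons.mp hp with rfl | hp
          · omega
          · exact hall p hp

-- B's loop over adjacent pairs is the prefix chain on the sorted list
theorem chainOk_iff (l : List String) :
    chainOk (l.zip l.tail) = true ↔ l.IsChain (fun a b => a.toList <+: b.toList) := by
  induction l with
  | nil => simp [chainOk]
  | cons x t ih =>
      cases t with
      | nil => simp [chainOk]
      | cons y r =>
          rw [List.isChain_cons]
          have hz : (x :: y :: r).zip (x :: y :: r).tail = (x, y) :: ((y :: r).zip (y :: r).tail) := by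
            simp
          rw [hz]
          by_cases hs : PySem.Str.startswith y x
          · have hxy : x.toList <+: y.toList := by
              rw [PySem.Str.startswith_eq] at hs
              exact (PySem.Chars.startswith_iff _ _).mp hs
            simp only [chainOk, hs, Bool.not_true, Bool.false_eq_true, if_false]
            rw [ih]
            constructor
            · intro hr
              refine ⟨?_, hr⟩
              intro z hz'
              simp only [List.head?_cons, Option.mem_def, Option.some.injEq] at hz'
              subst hz'
              exact hxy
            · rintro ⟨_, hr⟩
              exact hr
          · have hxy : ¬ x.toList <+: y.toList := by
              intro hc
              exact hs (by
                rw [PySem.Str.startswith_eq]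
                exact (PySem.Chars.startswith_iff _ _).mpr hc)
            have hs' : PySem.Str.startswith y x = false := by
              cases h : PySem.Str.startswith y x
              · rfl
              · exact absurd h hs
            simp only [chainOk, hs', Bool.not_false, if_true]
            simp only [Bool.false_eq_true, false_iff, not_and]
            intro hhead
            exact absurd (hhead y (by simp)) hxy

-- in a pairwise-related list every element is the last one or related to it
theorem pairwise_rel_getLast {R : String → String → Prop} {l : List String}
    (hp : l.Pairwise R) (hne : l ≠ []) (x : String) (hx : x ∈ l) :
    x = l.getLast hne ∨ R x (l.getLast hne) := by
  have hd := List.dropLast_append_getLast hne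
  rw [← hd] at hp hx
  rcases List.mem_append.mp hx with h | h
  · right; exact ((List.pairwise_append.mp hp).2.2 x h _ (by simp))
  · left; simpa using h

-- ===== VERDICT (by name: the statement is the Claim_ definition above) =====
theorem union_p_spec : Claim_equal_union_p := by
  intro prefixes _
  unfold Spec_union_p union_p union_p_alt
  simp only []
  set L := prefixes.foldl
    (fun longest p => if PySem.Str.len p > PySem.Str.len longest then p else longest) "" with hL
  rcases hcase : PySem.List.sorted prefixes (fun s => PySem.Str.len s) with _ | ⟨x, t⟩
  · -- empty input: both return some ""
    have hnil : prefixes = [] := (PySem.List.sorted_eq_nil_iff _ _ _).mp hcase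
    subst hnil
    simp [unionCheck, hL]
  · -- nonempty input
    have hne : x :: t ≠ ([] : List String) := by simp
    have hmemord : ∀ y : String, y ∈ x :: t ↔ y ∈ prefixes := by
      intro y
      rw [← hcase]
      exact PySem.List.mem_sorted prefixes _ false y
    have hpairlen : (x :: t).Pairwise (fun a b => PySem.Str.len a ≤ PySem.Str.len b) := by
      rw [← hcase]
      exact PySem.List.sorted_pairwise prefixes _
    have hlastmem : (x :: t).getLast hne ∈ prefixes :=
      (hmemord _).mp (List.getLast_mem hne)
    obtain ⟨hLmem, -, hLmax⟩ := foldl_longest_spec prefixes ""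
    rw [← hL] at hLmem hLmax
    have hlastmax : ∀ y ∈ prefixes, PySem.Str.len y ≤ PySem.Str.len ((x :: t).getLast hne) := by
      intro y hy
      rcases pairwise_rel_getLast hpairlen hne y ((hmemord y).mpr hy) with h | h
      · rw [h]
      · exact h
    by_cases hP : ∀ p ∈ prefixes, p.toList <+: L.toList
    · -- all strings are prefixes of the longest: both return it
      have hlasteq : (x :: t).getLast hne = L := by
        have hpre : ((x :: t).getLast hne).toList <+: L.toList := hP _ hlastmem
        have hlenle : PySem.Str.len L ≤ PySem.Str.len ((x :: t).getLast hne) := by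
          rcases hLmem with h | h
          · rw [h]
            rw [PySem.Str.len_eq, PySem.Str.len_eq]
            simp
          · exact hlastmax L h
        rw [PySem.Str.len_eq, PySem.Str.len_eq] at hlenle
        have : L.toList.length ≤ ((x :: t).getLast hne).toList.length := by exact_mod_cast hlenle
        exact String.toList_inj.mp (hpre.eq_of_length_le this)
      have hpairpre : (x :: t).Pairwise (fun a b => a.toList <+: b.toList) := by
        refine hpairlen.imp_of_mem ?_
        intro a b ha hb hab
        refine List.prefix_of_prefix_length_le (hP a ((hmemord a).mp ha))
          (hP b ((hmemord b).mp hb)) ?_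
        rw [PySem.Str.len_eq, PySem.Str.len_eq] at hab
        exact_mod_cast hab
      have hchain : chainOk ((x :: t).zip t) = true :=
        (chainOk_iff (x :: t)).mpr
          ((@List.isChain_iff_pairwise _ _ _ ⟨fun h1 h2 => h1.trans h2⟩).mpr hpairpre)
      rw [unionCheck_eq, if_pos hP]
      show some L = if chainOk ((x :: t).zip t) = true then some ((x :: t).getLast hne) else none
      rw [hchain, if_pos rfl, hlasteq]
    · -- some string is not a prefix of the longest: both return none
      have hchain : chainOk ((x :: t).zip t) = false := by
        cases hc : chainOk ((x :: t).zip t)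
        · rfl
        exfalso
        have hpairpre : (x :: t).Pairwise (fun a b => a.toList <+: b.toList) :=
          (@List.isChain_iff_pairwise _ _ _ ⟨fun h1 h2 => h1.trans h2⟩).mp
            ((chainOk_iff (x :: t)).mp hc)
        have hall : ∀ p ∈ prefixes, p.toList <+: ((x :: t).getLast hne).toList := by
          intro p hp
          rcases pairwise_rel_getLast hpairpre hne p ((hmemord p).mpr hp) with h | h
          · rw [h]
          · exact h
        apply hP
        rcases hLmem with h | h
        · -- L is the start value "": every input string is empty
          intro p hp
          have hple := hLmax p hp
          rw [h] at hple ⊢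
          rw [PySem.Str.len_eq, PySem.Str.len_eq] at hple
          have hl0 : p.toList.length = 0 := by simpa using hple
          simp [List.length_eq_zero_iff.mp hl0]
        · -- L is an input string: it must be the last of the sorted list
          have hpre : L.toList <+: ((x :: t).getLast hne).toList := hall L h
          have hlen : ((x :: t).getLast hne).toList.length ≤ L.toList.length := by
            have := hLmax _ hlastmem
            rw [PySem.Str.len_eq, PySem.Str.len_eq] at this
            exact_mod_cast this
          have hEq : L = (x :: t).getLast hne := String.toList_inj.mp (hpre.eq_of_length_le hlen)
          intro p hp
          rw [hEq]
          exact hall p hp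
      rw [unionCheck_eq, if_neg hP]
      show none = if chainOk ((x :: t).zip t) = true then some ((x :: t).getLast hne) else none
      rw [hchain]
      simp
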